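-- pv_equiv track=rewrite | github.com/tpguarnieri/advent_of_code_2025 | day_9/day_9.py | get_grid
-- ===== SOURCE A (Python) =====
-- def get_grid(boundary):
--     ROWS = max(c[1] for c in boundary)
--     COLS = max(c[0] for c in boundary)
--
--     grid = []
--     for y in range(ROWS + 1):
--         row = []
--         for x in range(COLS + 1):
--             if (x, y) in boundary:
--                 row.append("#")
--             else:
--                 row.append(".")
--         grid.append(row)
--
--     return grid
-- ===== SOURCE B (Python) =====
-- def get_grid(boundary):
--     ROWS = max(c[1] for c in boundary)
--     COLS = max(c[0] for c in boundary)
--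
--     grid = [["."] * (COLS + 1) for _ in range(ROWS + 1)]
--     for x, y in boundary:
--         if x >= 0 and y >= 0:
--             grid[y][x] = "#"
--     return grid
-- ===== Notes on version B (the rewrite author's own statement) =====
-- stated objective: faster
-- what changed: Instead of testing membership of every grid cell in the boundary list (a scan of boundary per cell), B allocates the full grid of '.' once and then scatters '#' with one direct assignment per boundary point (skipping points with a negative coordinate, which A's bounded scan never visits).
import Mathlib
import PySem

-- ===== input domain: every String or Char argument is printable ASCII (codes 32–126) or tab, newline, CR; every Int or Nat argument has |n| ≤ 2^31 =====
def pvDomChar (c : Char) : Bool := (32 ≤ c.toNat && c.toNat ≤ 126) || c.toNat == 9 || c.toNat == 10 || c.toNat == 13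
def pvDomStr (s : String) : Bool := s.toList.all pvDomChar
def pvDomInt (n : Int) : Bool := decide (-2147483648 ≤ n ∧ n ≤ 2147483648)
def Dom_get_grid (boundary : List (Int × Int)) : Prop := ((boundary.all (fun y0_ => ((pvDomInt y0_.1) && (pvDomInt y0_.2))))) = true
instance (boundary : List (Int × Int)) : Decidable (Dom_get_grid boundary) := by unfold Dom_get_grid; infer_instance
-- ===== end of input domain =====

-- B replaces A's per-cell membership scan of the boundary list by a fill-then-scatter pass:
-- allocate the '.' grid once, then one direct write per boundary point (nonnegative coords only,
-- which are the only cells A's bounded scan can visit). Return values proved equal on Pre_.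

-- ===== PORT A =====
def get_grid (boundary : List (Int × Int)) : List (List String) :=
  match PySem.List.max? (boundary.map (fun c => c.2)) (fun y => y),
        PySem.List.max? (boundary.map (fun c => c.1)) (fun y => y) with
  | some ROWS, some COLS =>
      (PySem.List.pyRange 0 (ROWS + 1) 1).foldl (fun grid y =>
        grid ++ [(PySem.List.pyRange 0 (COLS + 1) 1).foldl (fun row x =>
          row ++ [if (x, y) ∈ boundary then "#" else "."]) []]) []
  | _, _ => []  -- unreachable under Pre_ (Python raises ValueError on an empty boundary)

-- ===== PORT B =====
def get_grid_alt (boundary : List (Int × Int)) : List (List String) :=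
  match PySem.List.max? (boundary.map (fun c => c.2)) (fun y => y) with
  | none => []  -- unreachable under Pre_ (B's Python raises ValueError on an empty boundary)
  | some ROWS =>
    match PySem.List.max? (boundary.map (fun c => c.1)) (fun y => y) with
    | none => []
    | some COLS =>
      boundary.foldl (fun grid p =>
        if 0 ≤ p.1 ∧ 0 ≤ p.2 then
          grid.modify p.2.toNat (fun row => row.set p.1.toNat "#")
        else grid)
        (List.replicate (ROWS + 1).toNat (List.replicate (COLS + 1).toNat "."))

-- ===== PRECONDITION & SPEC =====
-- Pre_ excludes only the empty list, on which both Pythons raise ValueError (max of empty sequence).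
def Pre_get_grid (boundary : List (Int × Int)) : Prop := boundary ≠ []
instance (boundary : List (Int × Int)) : Decidable (Pre_get_grid boundary) := by unfold Pre_get_grid; infer_instance
def pvWitness_get_grid : (List (Int × Int)) := [(0, 0), (2, 1)]

def Spec_get_grid (boundary : List (Int × Int)) (out : List (List String)) : Prop := out = get_grid_alt boundary
instance (boundary : List (Int × Int)) (out : List (List String)) : Decidable (Spec_get_grid boundary out) := by unfold Spec_get_grid; infer_instance

-- ===== CLAIM (what is proved, stated in full; the proofs are below) =====
def Claim_equal_get_grid : Prop := ∀ (boundary : List (Int × Int)), Dom_get_grid boundary → Pre_get_grid boundary → Spec_get_grid boundary (get_grid boundary)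

-- ===== LEMMAS AND PROOFS =====

-- the grid described cell-by-cell: cell (i, j) is '#' iff (i, j) is a boundary point
def pvMark (bd : List (Int × Int)) (i j : Nat) : String :=
  if ((i : Int), (j : Int)) ∈ bd then "#" else "."

def pvGridOf (R C : Nat) (bd : List (Int × Int)) : List (List String) :=
  (List.range R).map (fun j => (List.range C).map (fun i => pvMark bd i j))

lemma pvGridOf_nil (R C : Nat) :
    pvGridOf R C [] = List.replicate R (List.replicate C ".") := by
  simp [pvGridOf, pvMark, List.map_const']

lemma pvMark_append_of_ne (bd : List (Int × Int)) (p : Int × Int) (i j : Nat)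
    (h : ((i : Int), (j : Int)) ≠ p) : pvMark (bd ++ [p]) i j = pvMark bd i j := by
  by_cases hm : ((i : Int), (j : Int)) ∈ bd <;> simp [pvMark, hm, h]

-- one scatter step turns the grid for bd into the grid for bd ++ [p]
lemma pvStep_grid (ROWS COLS : Int) (p : Int × Int) (hp1 : p.1 ≤ COLS) (hp2 : p.2 ≤ ROWS)
    (bd : List (Int × Int)) :
    (if 0 ≤ p.1 ∧ 0 ≤ p.2 then
        (pvGridOf (ROWS + 1).toNat (COLS + 1).toNat bd).modify p.2.toNat
          (fun row => row.set p.1.toNat "#")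
      else pvGridOf (ROWS + 1).toNat (COLS + 1).toNat bd)
    = pvGridOf (ROWS + 1).toNat (COLS + 1).toNat (bd ++ [p]) := by
  obtain ⟨x, y⟩ := p
  simp only at hp1 hp2 ⊢
  by_cases hxy : 0 ≤ x ∧ 0 ≤ y
  · obtain ⟨hx, hy⟩ := hxy
    rw [if_pos ⟨hx, hy⟩]
    apply List.ext_getElem
    · simp [pvGridOf]
    · intro j hj hj'
      simp only [pvGridOf] at hj
      rw [List.getElem_modify]
      simp only [pvGridOf, List.getElem_map, List.getElem_range]
      by_cases hjy : y.toNat = j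
      · rw [if_pos hjy]
        apply List.ext_getElem
        · simp
        · intro i hi hi'
          simp only [] at hi
          rw [List.getElem_set]
          simp only [List.getElem_map, List.getElem_range]
          by_cases hix : x.toNat = i
          · rw [if_pos hix]
            have : ((i : Int), (j : Int)) = (x, y) := by
              subst hix; subst hjy
              simp [Int.toNat_of_nonneg hx, Int.toNat_of_nonneg hy]
            simp [pvMark, this]
          · rw [if_neg hix]
            have hne : ((i : Int), (j : Int)) ≠ (x, y) := by
              intro h
              apply hix
              have : (i : Int) = x := by simpa using congrArg Prod.fst h
              omega
            exact (pvMark_append_of_ne bd (x, y) i j hne).symm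
      · rw [if_neg hjy]
        apply List.map_congr_left
        intro i hi
        have hne : ((i : Int), (j : Int)) ≠ (x, y) := by
          intro h
          apply hjy
          have : (j : Int) = y := by simpa using congrArg Prod.snd h
          omega
        exact (pvMark_append_of_ne bd (x, y) i j hne).symm
  · rw [if_neg hxy]
    unfold pvGridOf
    apply List.map_congr_left
    intro j hj
    apply List.map_congr_left
    intro i hi
    have hne : ((i : Int), (j : Int)) ≠ (x, y) := by
      intro h
      apply hxy
      have h1 : (i : Int) = x := by simpa using congrArg Prod.fst h
      have h2 : (j : Int) = y := by simpa using congrArg Prod.snd h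
      omega
    exact (pvMark_append_of_ne bd (x, y) i j hne).symm

-- the whole scatter loop, by induction on the remaining points
lemma pvScatter (ROWS COLS : Int) (l : List (Int × Int))
    (hb : ∀ p ∈ l, p.1 ≤ COLS ∧ p.2 ≤ ROWS) (bd : List (Int × Int)) :
    l.foldl (fun grid p =>
        if 0 ≤ p.1 ∧ 0 ≤ p.2 then
          grid.modify p.2.toNat (fun row => row.set p.1.toNat "#")
        else grid)
      (pvGridOf (ROWS + 1).toNat (COLS + 1).toNat bd)
    = pvGridOf (ROWS + 1).toNat (COLS + 1).toNat (bd ++ l) := by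
  induction l generalizing bd with
  | nil => simp
  | cons p t ih =>
    simp only [List.foldl_cons]
    rw [pvStep_grid ROWS COLS p (hb p (by simp)).1 (hb p (by simp)).2 bd]
    rw [ih (fun q hq => hb q (by simp [hq])) (bd ++ [p])]
    simp

-- A's row-by-row gather builds the same cell-by-cell grid
lemma pvGather (ROWS COLS : Int) (bd : List (Int × Int)) :
    (PySem.List.pyRange 0 (ROWS + 1) 1).foldl (fun grid y =>
        grid ++ [(PySem.List.pyRange 0 (COLS + 1) 1).foldl (fun row x =>
          row ++ [if (x, y) ∈ bd then "#" else "."]) []]) []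
    = pvGridOf (ROWS + 1).toNat (COLS + 1).toNat bd := by
  simp only [PySem.List.foldl_append_singleton_eq_map, PySem.List.pyRange_one,
    List.nil_append, List.map_map, Int.sub_zero, zero_add]
  unfold pvGridOf
  apply List.map_congr_left
  intro j hj
  apply List.map_congr_left
  intro i hi
  simp [pvMark]

-- ===== VERDICT (by name: the statement is the Claim_ definition above) =====
theorem get_grid_spec : Claim_equal_get_grid := by
  intro boundary _ hpre
  unfold Spec_get_grid get_grid get_grid_alt
  have hy : boundary.map (fun c => c.2) ≠ [] := by
    simpa using hpre
  have hx : boundary.map (fun c => c.1) ≠ [] := by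
    simpa using hpre
  cases h2 : PySem.List.max? (boundary.map (fun c => c.2)) (fun y => y) with
  | none => exact absurd (((PySem.List.max?_eq_none_iff _ _).mp h2)) hy
  | some ROWS =>
    cases h1 : PySem.List.max? (boundary.map (fun c => c.1)) (fun y => y) with
    | none => exact absurd (((PySem.List.max?_eq_none_iff _ _).mp h1)) hx
    | some COLS =>
      simp only
      have hb : ∀ p ∈ boundary, p.1 ≤ COLS ∧ p.2 ≤ ROWS := by
        intro p hp
        exact ⟨PySem.List.max?_isMax h1 p.1 (List.mem_map_of_mem hp),
               PySem.List.max?_isMax h2 p.2 (List.mem_map_of_mem hp)⟩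
      rw [pvGather ROWS COLS boundary, ← pvGridOf_nil]
      rw [pvScatter ROWS COLS boundary hb []]
      simp
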